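-- pv_equiv track=rewrite | github.com/leslie071564/EventCoreference | utils.py | build_sentence_structure
-- ===== SOURCE A (Python) =====
-- def sentences_to_tokens(sentences):
--     start_token_idx, fin_token_idx = [0], []
--     for sent in sentences:
--         next_boundary = start_token_idx[-1] + len(sent)
--         start_token_idx.append(next_boundary)
--         fin_token_idx.append(next_boundary)
--
--     return list(zip(start_token_idx, fin_token_idx))
--
-- def is_symbolic_line(line):
--     if type(line) == list:
--         return not any(c.isalpha() for c in ' '.join(line))
--
--     return not any(c.isalpha() for c in line)
--
-- def build_sentence_structure(sentences):
--     # remove sentence that consists of symbols.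
--     filtered_sentences = []
--     topic_line = None
--     for s in sentences:
--         if is_symbolic_line(s):
--             filtered_sentences.append([])
--             continue
--
--         filtered_sentences.append([s])
--         if topic_line == None:
--             topic_line = ' '.join(s)
--
--     # seperate repetitive topic lines.
--     for i, s in enumerate(filtered_sentences):
--         if len(s) == 0:
--             continue
--
--         ss = ' '.join(s[0])
--         seperate_sentences = []
--         while ss.startswith(topic_line):
--             seperate_sentences.append(topic_line.split())
--             ss = ss[len(topic_line) + 1:]
--         if len(ss) != 0:
--             seperate_sentences.append(ss.split())
--         filtered_sentences[i] = seperate_sentences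
--
--     # maintain the sentence indexes
--     raw_indexes = {ii: sent_idx for ii, sent_idx in enumerate(sentences_to_tokens(sentences))}
--     s_indexes = []
--     escape_tokens = []
--     for i, s in enumerate(filtered_sentences):
--         if len(s) == 0:
--             escape_tokens += list(range(*raw_indexes[i]))
--             continue
--
--         if len(s) == 1:
--             s_indexes.append(raw_indexes[i])
--             continue
--
--         offset, _ = raw_indexes[i]
--         for sub in s:
--             s_indexes.append([offset, offset + len(sub)])
--             offset += len(sub)
--     return {ii: sent_idx for ii, sent_idx in enumerate(s_indexes)}, escape_tokens
-- ===== SOURCE B (Python) =====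
-- def build_sentence_structure(sentences):
--     # Pass 1: topic line = join of the first sentence containing an alphabetic char.
--     topic_line = None
--     for s in sentences:
--         joined = ' '.join(s)
--         if any(c.isalpha() for c in joined):
--             topic_line = joined
--             break
--
--     # Pass 2: single sweep with a running token offset; classify each sentence inline.
--     index_list, escape_tokens = [], []
--     offset = 0
--     for s in sentences:
--         n = len(s)
--         ss = ' '.join(s)
--         if not any(c.isalpha() for c in ss):
--             escape_tokens.extend(range(offset, offset + n))
--         else:
--             pieces = []
--             while ss.startswith(topic_line):
--                 pieces.append(topic_line.split())
--                 ss = ss[len(topic_line) + 1:]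
--             if ss:
--                 pieces.append(ss.split())
--             if len(pieces) == 1:
--                 index_list.append((offset, offset + n))
--             else:
--                 sub_offset = offset
--                 for sub in pieces:
--                     index_list.append([sub_offset, sub_offset + len(sub)])
--                     sub_offset += len(sub)
--         offset += n
--     return dict(enumerate(index_list)), escape_tokens
-- ===== Notes on version B (the rewrite author's own statement) =====
-- stated objective: simpler
-- what changed: B replaces A's three staged passes (filtered_sentences list rewritten in place, a separate sentences_to_tokens zip and a raw_indexes dict) with a topic scan plus one sweep that classifies each sentence and computes its token range inline from a running offset.
import Mathlib
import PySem

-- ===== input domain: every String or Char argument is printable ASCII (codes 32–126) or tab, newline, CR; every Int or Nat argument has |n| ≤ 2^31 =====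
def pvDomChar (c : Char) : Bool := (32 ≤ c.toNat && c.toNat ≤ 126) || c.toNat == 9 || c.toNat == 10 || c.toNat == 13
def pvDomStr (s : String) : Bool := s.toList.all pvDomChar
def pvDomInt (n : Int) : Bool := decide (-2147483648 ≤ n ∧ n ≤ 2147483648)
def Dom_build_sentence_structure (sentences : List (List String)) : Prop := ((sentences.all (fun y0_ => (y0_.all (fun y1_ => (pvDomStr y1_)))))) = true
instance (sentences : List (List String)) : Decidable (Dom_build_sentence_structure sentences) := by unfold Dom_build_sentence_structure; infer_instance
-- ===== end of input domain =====

-- B rebuilds the same structure in two passes (topic scan + one sweep with a running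
-- token offset), dropping A's staged filtered_sentences rewrite and raw-index dict;
-- objective: simpler decomposition, same exact return value.

-- shared primitive: Python's ' '.join(list_of_str), as a list of code points
def pvJoin (s : List String) : List Char := PySem.Chars.join [' '] (s.map String.toList)

-- shared primitive: any(c.isalpha() for c in cs)
def pvHasAlpha (cs : List Char) : Bool := cs.any PySem.Chars.isalpha

-- ===== PORT A =====

-- sentences_to_tokens
def pvA_tokens (sentences : List (List String)) : List (Int × Int) :=
  let p := sentences.foldl (fun (st : List Int × List Int) sent =>
      let nb := ((PySem.List.pyGet? st.1 (-1)).getD 0) + (sent.length : Int)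
      (st.1 ++ [nb], st.2 ++ [nb])) ([0], [])
  p.1.zip p.2

-- the 'while ss.startswith(topic_line)' loop (fuel makes the recursion total;
-- fuel = len(ss)+1 is enough whenever topic ≠ '', the only case A reaches)
def pvA_sep (fuel : Nat) (topic : List Char) (ss : List Char) (acc : List (List (List Char))) :
    List Char × List (List (List Char)) :=
  match fuel with
  | 0 => (ss, acc)
  | fuel + 1 =>
    if PySem.Chars.startswith ss topic then
      pvA_sep fuel topic (PySem.Chars.slice ss (some ((topic.length : Int) + 1)) none)
        (acc ++ [PySem.Chars.split₀ topic])
    else (ss, acc)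

-- body of A's second loop for a kept sentence
def pvA_split (topic : List Char) (ss : List Char) : List (List (List Char)) :=
  let p := pvA_sep (ss.length + 1) topic ss []
  if p.1.length ≠ 0 then p.2 ++ [PySem.Chars.split₀ p.1] else p.2

def build_sentence_structure (sentences : List (List String)) : (List (Int × List Int)) × List Int :=
  -- loop 1: filter symbolic sentences, record first topic line
  let st1 := sentences.foldl
    (fun (st : List (List (List String)) × Option (List Char)) s =>
      if !pvHasAlpha (pvJoin s) then (st.1 ++ [[]], st.2)
      else (st.1 ++ [[s]], match st.2 with | none => some (pvJoin s) | some t => some t))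
    ([], none)
  let topic := st1.2.getD []
  -- loop 2: split repeated topic lines
  let filtered2 : List (List (List (List Char))) := st1.1.map (fun s =>
      match s with
      | [] => ([] : List (List (List Char)))
      | s0 :: _ => pvA_split topic (pvJoin s0))
  -- loop 3: indexes via the raw_indexes dict
  let raw := PySem.Dict.mk (PySem.List.enumerate (pvA_tokens sentences) 0)
  let st3 := (PySem.List.enumerate filtered2 0).foldl
    (fun (st : List (List Int) × List Int) is =>
      let rb := raw.getD is.1 (0, 0)
      if is.2.length = 0 then (st.1, st.2 ++ PySem.List.pyRange rb.1 rb.2 1)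
      else if is.2.length = 1 then (st.1 ++ [[rb.1, rb.2]], st.2)
      else
        let inner := is.2.foldl (fun (q : List (List Int) × Int) sub =>
            (q.1 ++ [[q.2, q.2 + (sub.length : Int)]], q.2 + (sub.length : Int))) (st.1, rb.1)
        (inner.1, st.2))
    ([], [])
  (PySem.List.enumerate st3.1 0, st3.2)

-- ===== PORT B =====

-- pass 1: topic line = join of the first sentence containing a letter
def pvB_topic : List (List String) → Option (List Char)
  | [] => none
  | s :: rest =>
    let j := pvJoin s
    if pvHasAlpha j then some j else pvB_topic rest

-- the same while loop written as a cons-recursion that also appends the remainder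
def pvB_pieces (fuel : Nat) (topic : List Char) (ss : List Char) : List (List (List Char)) :=
  match fuel with
  | 0 => if ss.length ≠ 0 then [PySem.Chars.split₀ ss] else []
  | fuel + 1 =>
    if PySem.Chars.startswith ss topic then
      PySem.Chars.split₀ topic ::
        pvB_pieces fuel topic (PySem.Chars.slice ss (some ((topic.length : Int) + 1)) none)
    else if ss.length ≠ 0 then [PySem.Chars.split₀ ss] else []

def build_sentence_structure_alt (sentences : List (List String)) : (List (Int × List Int)) × List Int :=
  let topic := pvB_topic sentences
  -- pass 2: one sweep, state = (index_list, escape_tokens, running offset)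
  let fin := sentences.foldl
    (fun (st : List (List Int) × List Int × Int) s =>
      let n : Int := s.length
      let ss := pvJoin s
      if !pvHasAlpha ss then (st.1, st.2.1 ++ PySem.List.pyRange st.2.2 (st.2.2 + n) 1, st.2.2 + n)
      else
        let pieces := pvB_pieces (ss.length + 1) (topic.getD []) ss
        if pieces.length = 1 then (st.1 ++ [[st.2.2, st.2.2 + n]], st.2.1, st.2.2 + n)
        else
          let q := pieces.foldl (fun (q : List (List Int) × Int) sub =>
              (q.1 ++ [[q.2, q.2 + (sub.length : Int)]], q.2 + (sub.length : Int))) (st.1, st.2.2)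
          (q.1, st.2.1, st.2.2 + n))
    ([], [], 0)
  (PySem.List.enumerate fin.1 0, fin.2.1)

-- ===== PRECONDITION & SPEC =====
def Spec_build_sentence_structure (sentences : List (List String)) (out : (List (Int × List Int)) × List Int) : Prop := out = build_sentence_structure_alt sentences
instance (sentences : List (List String)) (out : (List (Int × List Int)) × List Int) : Decidable (Spec_build_sentence_structure sentences out) := by unfold Spec_build_sentence_structure; infer_instance

-- ===== CLAIM (what is proved, stated in full; the proofs are below) =====
def Claim_equal_build_sentence_structure : Prop := ∀ (sentences : List (List String)), Dom_build_sentence_structure sentences → Spec_build_sentence_structure sentences (build_sentence_structure sentences)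

-- ===== LEMMAS AND PROOFS =====

-- boundaries of the sentences as (start, end) token indexes, from a running offset
def pvBounds (off : Int) : List (List String) → List (Int × Int)
  | [] => []
  | s :: r => (off, off + (s.length : Int)) :: pvBounds (off + (s.length : Int)) r

-- what A's loop 2 computes per sentence (proof-only abbreviation)
def pvG (t : List Char) (s : List String) : List (List (List Char)) :=
  if !pvHasAlpha (pvJoin s) then [] else pvA_split t (pvJoin s)

theorem pvBounds_length (sents : List (List String)) : ∀ off, (pvBounds off sents).length = sents.length := by
  induction sents with
  | nil => intro off; rfl
  | cons s r ih => intro off; simp [pvBounds, ih]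

-- loop 1: the topic component is the first joined line with a letter
theorem pv_topic_eq (sents : List (List String)) : ∀ (fs : List (List (List String))) (t : Option (List Char)),
    (sents.foldl
      (fun (st : List (List (List String)) × Option (List Char)) s =>
        if !pvHasAlpha (pvJoin s) then (st.1 ++ [[]], st.2)
        else (st.1 ++ [[s]], match st.2 with | none => some (pvJoin s) | some t => some t))
      (fs, t)).2
    = (match t with | some x => some x | none => pvB_topic sents) := by
  induction sents with
  | nil => intro fs t; cases t <;> rfl
  | cons s r ih =>
    intro fs t
    simp only [List.foldl_cons]
    split
    · next h =>
      rw [ih]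
      have h' : pvHasAlpha (pvJoin s) = false := by simpa using h
      cases t <;> simp [pvB_topic, h']
    · next h =>
      rw [ih]
      have h' : pvHasAlpha (pvJoin s) = true := by simpa using h
      cases t <;> simp [pvB_topic, h']

-- loop 1: the filtered list is a pointwise image of the input
theorem pv_filtered_eq (sents : List (List String)) : ∀ (fs : List (List (List String))) (t : Option (List Char)),
    (sents.foldl
      (fun (st : List (List (List String)) × Option (List Char)) s =>
        if !pvHasAlpha (pvJoin s) then (st.1 ++ [[]], st.2)
        else (st.1 ++ [[s]], match st.2 with | none => some (pvJoin s) | some t => some t))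
      (fs, t)).1
    = fs ++ sents.map (fun s => if !pvHasAlpha (pvJoin s) then ([] : List (List String)) else [s]) := by
  induction sents with
  | nil => intro fs t; simp
  | cons s r ih =>
    intro fs t
    simp only [List.foldl_cons, List.map_cons]
    split
    · next h => rw [ih]; simp
    · next h => rw [ih]; simp

-- sentences_to_tokens: the fold appends the end boundaries
theorem pv_tok_fold (sents : List (List String)) : ∀ (p q : List Int) (c : Int),
    (sents.foldl (fun (st : List Int × List Int) sent =>
        let nb := ((PySem.List.pyGet? st.1 (-1)).getD 0) + (sent.length : Int)
        (st.1 ++ [nb], st.2 ++ [nb])) (p ++ [c], q))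
    = (p ++ [c] ++ (pvBounds c sents).map (·.2), q ++ (pvBounds c sents).map (·.2)) := by
  induction sents with
  | nil => intro p q c; simp [pvBounds]
  | cons s r ih =>
    intro p q c
    simp only [List.foldl_cons, PySem.List.pyGet?_neg_one_append_singleton, Option.getD_some]
    have := ih (p ++ [c]) (q ++ [c + (s.length : Int)]) (c + (s.length : Int))
    simp only [List.append_assoc] at this ⊢
    rw [this]
    simp [pvBounds]

theorem pv_zip_bounds (sents : List (List String)) : ∀ (c : Int),
    ((c :: (pvBounds c sents).map (·.2)).zip ((pvBounds c sents).map (·.2))) = pvBounds c sents := by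
  induction sents with
  | nil => intro c; rfl
  | cons s r ih => intro c; simp [pvBounds, ih]

theorem pv_tokens_eq (sents : List (List String)) : pvA_tokens sents = pvBounds 0 sents := by
  unfold pvA_tokens
  have h := pv_tok_fold sents [] [] 0
  simp only [List.nil_append] at h
  rw [h]
  simpa using pv_zip_bounds sents 0

-- dict of enumerated pairs looks up by position
theorem pv_getD_enum (r : List (Int × Int)) : ∀ (s : Int) (j : Nat) (hj : j < r.length),
    (PySem.Dict.mk (PySem.List.enumerate r s)).getD (s + (j : Int)) ((0 : Int), (0 : Int)) = r[j] := by
  induction r with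
  | nil => intro s j hj; simp at hj
  | cons x xs ih =>
    intro s j hj
    rw [PySem.List.enumerate_cons]
    cases j with
    | zero => simp [PySem.Dict.getD_eq_get?_getD, PySem.Dict.get?_mk_cons]
    | succ j =>
      have hlt : j < xs.length := by simpa using hj
      have harg : s + (((j + 1 : Nat)) : Int) = (s + 1) + ((j : Nat) : Int) := by push_cast; ring
      have h1 : (s == s + (((j + 1 : Nat)) : Int)) = false := by
        simp only [beq_eq_false_iff_ne, ne_eq]
        push_cast
        omega
      rw [PySem.Dict.getD_eq_get?_getD, PySem.Dict.get?_mk_cons, h1]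
      simp only [Bool.false_eq_true, if_false]
      rw [harg, ← PySem.Dict.getD_eq_get?_getD]
      simpa using ih (s + 1) j hlt

-- a fold over enumerate + positional dict lookups is a fold over the zipped list
theorem pv_enumFold {α σ : Type} (F : σ → (Int × Int) → α → σ) (d : PySem.Dict Int (Int × Int)) :
    ∀ (l : List α) (r : List (Int × Int)) (k : Int) (st : σ),
    l.length = r.length →
    (∀ (j : Nat) (hj : j < r.length), d.getD (k + (j : Int)) ((0 : Int), (0 : Int)) = r[j]) →
    (PySem.List.enumerate l k).foldl (fun st is => F st (d.getD is.1 ((0 : Int), (0 : Int))) is.2) st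
      = (r.zip l).foldl (fun st p => F st p.1 p.2) st := by
  intro l
  induction l with
  | nil =>
    intro r k st hlen _
    cases r with
    | nil => rfl
    | cons b bs => simp at hlen
  | cons x xs ih =>
    intro r k st hlen h
    cases r with
    | nil => simp at hlen
    | cons b bs =>
      rw [PySem.List.enumerate_cons]
      simp only [List.zip_cons_cons, List.foldl_cons]
      have h0 := h 0 (by simp)
      simp only [Nat.cast_zero, add_zero, List.getElem_cons_zero] at h0
      rw [h0]
      apply ih bs (k + 1) _ (by simpa using hlen)
      intro j hj
      have h' := h (j + 1) (by simpa using Nat.succ_lt_succ hj)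
      have harg : k + (((j + 1 : Nat)) : Int) = (k + 1) + ((j : Nat) : Int) := by push_cast; ring
      rw [harg] at h'
      simpa using h'

-- the two phrasings of the topic-stripping while loop agree
theorem pv_sep_acc (fuel : Nat) : ∀ (t ss : List Char) (acc : List (List (List Char))),
    pvA_sep fuel t ss acc = ((pvA_sep fuel t ss []).1, acc ++ (pvA_sep fuel t ss []).2) := by
  induction fuel with
  | zero => intro t ss acc; simp [pvA_sep]
  | succ fuel ih =>
    intro t ss acc
    simp only [pvA_sep]
    by_cases h : PySem.Chars.startswith ss t
    · simp only [h, if_true]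
      rw [ih t _ (acc ++ [PySem.Chars.split₀ t]), ih t _ ([] ++ [PySem.Chars.split₀ t])]
      simp
    · simp [h]

theorem pv_pieces_eq (fuel : Nat) : ∀ (t ss : List Char),
    pvB_pieces fuel t ss =
      (if (pvA_sep fuel t ss []).1.length ≠ 0
       then (pvA_sep fuel t ss []).2 ++ [PySem.Chars.split₀ (pvA_sep fuel t ss []).1]
       else (pvA_sep fuel t ss []).2) := by
  induction fuel with
  | zero => intro t ss; simp [pvB_pieces, pvA_sep]
  | succ fuel ih =>
    intro t ss
    simp only [pvB_pieces, pvA_sep]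
    by_cases h : PySem.Chars.startswith ss t
    · simp only [h, if_true]
      rw [pv_sep_acc fuel t _ ([] ++ [PySem.Chars.split₀ t]), ih]
      by_cases h2 : (pvA_sep fuel t (PySem.List.slice ss (some ((t.length : Int) + 1)) none) []).1 = []
      · simp [h2]
      · simp [h2]
    · simp [h]

theorem pv_split_eq (t ss : List Char) : pvA_split t ss = pvB_pieces (ss.length + 1) t ss := by
  rw [pv_pieces_eq]; rfl

theorem pv_pieces_ne (fuel : Nat) (t ss : List Char) (h : ss ≠ []) : pvB_pieces fuel t ss ≠ [] := by
  cases fuel with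
  | zero => simp [pvB_pieces, h]
  | succ fuel =>
    simp only [pvB_pieces]
    by_cases hs : PySem.Chars.startswith ss t
    · simp [hs]
    · simp [hs, h]

theorem pv_hasAlpha_ne_nil (ss : List Char) (h : pvHasAlpha ss = true) : ss ≠ [] := by
  intro he; subst he; simp [pvHasAlpha] at h

-- B's sweep body as a named function (proof-only abbreviation)
def pvBStep (t : List Char) (s : List String) (off : Int) (sidx : List (List Int)) (esc : List Int) :
    List (List Int) × List Int × Int :=
  if !pvHasAlpha (pvJoin s) then
    (sidx, esc ++ PySem.List.pyRange off (off + (s.length : Int)) 1, off + (s.length : Int))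
  else
    if (pvB_pieces ((pvJoin s).length + 1) t (pvJoin s)).length = 1 then
      (sidx ++ [[off, off + (s.length : Int)]], esc, off + (s.length : Int))
    else
      (((pvB_pieces ((pvJoin s).length + 1) t (pvJoin s)).foldl
          (fun (q : List (List Int) × Int) sub =>
            (q.1 ++ [[q.2, q.2 + (sub.length : Int)]], q.2 + (sub.length : Int))) (sidx, off)).1,
        esc, off + (s.length : Int))

-- B's literal fold body, rewritten to the named step
theorem pv_bstep_eq (t : List Char) :
    (fun (st : List (List Int) × List Int × Int) (s : List String) =>
      if !pvHasAlpha (pvJoin s) then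
        (st.1, st.2.1 ++ PySem.List.pyRange st.2.2 (st.2.2 + (s.length : Int)) 1, st.2.2 + (s.length : Int))
      else
        if (pvB_pieces ((pvJoin s).length + 1) t (pvJoin s)).length = 1 then
          (st.1 ++ [[st.2.2, st.2.2 + (s.length : Int)]], st.2.1, st.2.2 + (s.length : Int))
        else
          (((pvB_pieces ((pvJoin s).length + 1) t (pvJoin s)).foldl
              (fun (q : List (List Int) × Int) sub =>
                (q.1 ++ [[q.2, q.2 + (sub.length : Int)]], q.2 + (sub.length : Int))) (st.1, st.2.2)).1,
            st.2.1, st.2.2 + (s.length : Int)))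
    = fun st s => pvBStep t s st.2.2 st.1 st.2.1 := by
  funext st s
  simp [pvBStep]

-- one step of A's third loop equals one step of B's sweep
theorem pv_step (t : List Char) (s : List String) (off : Int) (sidx : List (List Int)) (esc : List Int) :
    (if (pvG t s).length = 0 then (sidx, esc ++ PySem.List.pyRange off (off + (s.length : Int)) 1)
     else if (pvG t s).length = 1 then (sidx ++ [[off, off + (s.length : Int)]], esc)
     else
       (((pvG t s).foldl (fun (q : List (List Int) × Int) sub =>
           (q.1 ++ [[q.2, q.2 + (sub.length : Int)]], q.2 + (sub.length : Int))) (sidx, off)).1, esc))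
    = ((pvBStep t s off sidx esc).1, (pvBStep t s off sidx esc).2.1)
    ∧ (pvBStep t s off sidx esc).2.2 = off + (s.length : Int) := by
  constructor
  · by_cases h : pvHasAlpha (pvJoin s) = true
    · have hp : pvG t s = pvB_pieces ((pvJoin s).length + 1) t (pvJoin s) := by
        simp [pvG, h, pv_split_eq]
      have hne := pv_pieces_ne ((pvJoin s).length + 1) t _ (pv_hasAlpha_ne_nil _ h)
      rw [hp]
      by_cases h1 : (pvB_pieces ((pvJoin s).length + 1) t (pvJoin s)).length = 1
      · simp [pvBStep, h, h1]
      · simp [pvBStep, h, h1, hne]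
    · simp [pvG, pvBStep, h]
  · by_cases h : pvHasAlpha (pvJoin s) = true
    · by_cases h1 : (pvB_pieces ((pvJoin s).length + 1) t (pvJoin s)).length = 1 <;>
        simp [pvBStep, h, h1]
    · simp [pvBStep, h]

-- the central lemma: A's third loop over (bounds, filtered) equals B's single sweep
theorem pv_main_fold (t : List Char) (sents : List (List String)) :
    ∀ (off : Int) (sidx : List (List Int)) (esc : List Int),
    ((pvBounds off sents).zip (sents.map (pvG t))).foldl
      (fun (st : List (List Int) × List Int) (p : (Int × Int) × List (List (List Char))) =>
        if p.2.length = 0 then (st.1, st.2 ++ PySem.List.pyRange p.1.1 p.1.2 1)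
        else if p.2.length = 1 then (st.1 ++ [[p.1.1, p.1.2]], st.2)
        else
          ((p.2.foldl (fun (q : List (List Int) × Int) sub =>
              (q.1 ++ [[q.2, q.2 + (sub.length : Int)]], q.2 + (sub.length : Int))) (st.1, p.1.1)).1,
            st.2)) (sidx, esc)
    = ((sents.foldl (fun (st : List (List Int) × List Int × Int) s => pvBStep t s st.2.2 st.1 st.2.1)
          (sidx, esc, off)).1,
       (sents.foldl (fun (st : List (List Int) × List Int × Int) s => pvBStep t s st.2.2 st.1 st.2.1)
          (sidx, esc, off)).2.1) := by
  induction sents with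
  | nil => intro off sidx esc; rfl
  | cons s r ih =>
    intro off sidx esc
    simp only [pvBounds, List.map_cons, List.zip_cons_cons, List.foldl_cons]
    obtain ⟨h1, h2⟩ := pv_step t s off sidx esc
    rw [h1, ih (off + (s.length : Int)) (pvBStep t s off sidx esc).1 (pvBStep t s off sidx esc).2.1]
    rw [show ((pvBStep t s off sidx esc).1, (pvBStep t s off sidx esc).2.1, off + (s.length : Int))
          = pvBStep t s off sidx esc by rw [← h2]]

theorem build_sentence_structure_main (sentences : List (List String)) :
    build_sentence_structure sentences = build_sentence_structure_alt sentences := by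
  simp only [build_sentence_structure, build_sentence_structure_alt]
  simp only [pv_topic_eq, pv_filtered_eq, List.nil_append, pv_tokens_eq]
  rw [List.map_map]
  have hmap : ((fun (s : List (List String)) =>
        match s with
        | [] => ([] : List (List (List Char)))
        | s0 :: _ => pvA_split ((pvB_topic sentences).getD []) (pvJoin s0)) ∘
      fun s => if !pvHasAlpha (pvJoin s) then ([] : List (List String)) else [s])
      = pvG ((pvB_topic sentences).getD []) := by
    funext s
    by_cases h : pvHasAlpha (pvJoin s) = true <;> simp [pvG, h, Function.comp]
  rw [hmap]
  have e := pv_enumFold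
        (fun (st : List (List Int) × List Int) (rb : Int × Int) (s : List (List (List Char))) =>
          if s.length = 0 then (st.1, st.2 ++ PySem.List.pyRange rb.1 rb.2 1)
          else if s.length = 1 then (st.1 ++ [[rb.1, rb.2]], st.2)
          else
            ((s.foldl (fun (q : List (List Int) × Int) sub =>
                (q.1 ++ [[q.2, q.2 + (sub.length : Int)]], q.2 + (sub.length : Int))) (st.1, rb.1)).1,
              st.2))
        (PySem.Dict.mk (PySem.List.enumerate (pvBounds 0 sentences) 0))
        (sentences.map (pvG ((pvB_topic sentences).getD []))) (pvBounds 0 sentences) 0 ([], [])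
        (by simp [pvBounds_length])
        (by intro j hj; exact pv_getD_enum (pvBounds 0 sentences) 0 j hj)
  simp only [] at e
  rw [e, pv_bstep_eq, pv_main_fold ((pvB_topic sentences).getD []) sentences 0 [] []]

-- ===== VERDICT (by name: the statement is the Claim_ definition above) =====
theorem build_sentence_structure_spec : Claim_equal_build_sentence_structure := by
  intro sentences _
  unfold Spec_build_sentence_structure
  exact build_sentence_structure_main sentences
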